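-- pv_equiv track=rewrite | github.com/cogito30/py_coding_test | programmers/Lv0/120896.py | solution
-- ===== SOURCE A (Python) =====
-- def solution(s):
--     answer = ''
--     countAlpha = {}
--     alphaList = []
--     for i in s:
--         if countAlpha.get(i):
--             countAlpha[i] += 1
--         else:
--             countAlpha[i] = 1
--     for k, v in countAlpha.items():
--         if v == 1:
--             alphaList.append(k)
--     alphaList.sort()
--     answer = ''.join(alphaList)
--     return answer
-- ===== SOURCE B (Python) =====
-- def solution(s):
--     # Sort all characters first, then scan runs of equal adjacent characters,
--     # keeping the character of each run of length exactly 1.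
--     def scan(t):
--         if not t:
--             return ''
--         c = t[0]
--         k = 1
--         while k < len(t) and t[k] == c:
--             k += 1
--         rest = scan(t[k:])
--         return c + rest if k == 1 else rest
--     return scan(sorted(s))
-- ===== Notes on version B (the rewrite author's own statement) =====
-- stated objective: alternative
-- what changed: B drops A's frequency dictionary entirely: it sorts all characters first and then scans the sorted list recursively, run by run, emitting the character of each run of equal adjacent characters whose length is exactly 1.
import Mathlib
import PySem

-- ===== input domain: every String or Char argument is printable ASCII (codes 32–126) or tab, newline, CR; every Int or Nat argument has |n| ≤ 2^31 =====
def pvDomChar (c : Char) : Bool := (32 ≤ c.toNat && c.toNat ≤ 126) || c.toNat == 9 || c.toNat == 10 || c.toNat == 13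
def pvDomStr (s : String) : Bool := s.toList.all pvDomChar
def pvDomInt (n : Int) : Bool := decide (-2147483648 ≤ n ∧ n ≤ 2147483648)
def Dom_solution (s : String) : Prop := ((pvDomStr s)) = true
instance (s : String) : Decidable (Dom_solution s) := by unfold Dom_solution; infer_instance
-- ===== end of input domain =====

-- B replaces A's frequency-dictionary pass + item-filter + sort by sort-first-then-scan:
-- sort all characters, then walk the sorted list once, keeping the character of every
-- run of equal adjacent characters whose length is exactly 1 (alternative decomposition).

-- ===== PORT A =====
-- 'if countAlpha.get(i):' tests Python truthiness of get's result: None (absent) and 0 are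
-- falsy, any other int truthy — encoded as getD i 0 ≠ 0 (values here are always ≥ 1).
def solution (s : String) : String :=
  let countAlpha : PySem.Dict Char Int := s.toList.foldl
    (fun d i => if d.getD i 0 ≠ 0 then d.insert i (d.getD i 0 + 1) else d.insert i 1)
    PySem.Dict.empty
  let alphaList : List Char := countAlpha.items.foldl
    (fun acc kv => if kv.2 == (1 : Int) then acc ++ [kv.1] else acc) []
  PySem.Str.join "" ((PySem.List.sorted alphaList (fun x => x) false).map (fun c => String.ofList [c]))

-- ===== PORT B =====
-- the inner 'while k < len(t) and t[k] == c: k += 1' of Source B: number of further leading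
-- copies of c (so the run length is 1 + this); exact for the 0-based forward scan
def runMore (c : Char) : List Char → Nat
  | [] => 0
  | x :: xs => if x == c then runMore c xs + 1 else 0

-- Source B's recursive scan over the sorted character list; Python strings are modeled as
-- List Char ('' = [], c + rest = c :: rest, t[k:] with k ≥ 1 = drop k — exact here)
def scanRuns : List Char → List Char
  | [] => []
  | c :: rest =>
    let k := 1 + runMore c rest
    let restOut := scanRuns ((c :: rest).drop k)
    if k == 1 then c :: restOut else restOut
  termination_by t => t.length
  decreasing_by
    simp only [List.length_drop, List.length_cons]
    omega

def solution_alt (s : String) : String :=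
  String.ofList (scanRuns (PySem.List.sorted s.toList (fun x => x) false))

-- ===== PRECONDITION & SPEC =====
def Spec_solution (s : String) (out : String) : Prop := out = solution_alt s
instance (s : String) (out : String) : Decidable (Spec_solution s out) := by unfold Spec_solution; infer_instance

-- ===== CLAIM (what is proved, stated in full; the proofs are below) =====
def Claim_equal_solution : Prop := ∀ (s : String), Dom_solution s → Spec_solution s (solution s)

-- ===== LEMMAS AND PROOFS =====

-- A's counting loop body is, pointwise, the counter-building step
lemma loopA_eq :
    (fun (d : PySem.Dict Char Int) i =>
        if d.getD i 0 ≠ 0 then d.insert i (d.getD i 0 + 1) else d.insert i 1)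
      = fun d x => d.insert x (d.getD x 0 + 1) := by
  funext d x
  by_cases h : d.getD x 0 = 0 <;> simp [h]

-- A's result, as a sorted filtered dedup list
lemma listA_eq (l : List Char) :
    ((l.foldl (fun d i =>
        if d.getD i 0 ≠ 0 then d.insert i (d.getD i 0 + 1) else d.insert i 1)
        PySem.Dict.empty).items.foldl
      (fun acc kv => if kv.2 == (1 : Int) then acc ++ [kv.1] else acc) [])
    = (PySem.Set.ofList l).filter (fun c => l.count c == 1) := by
  rw [loopA_eq, PySem.Dict.foldl_insert_getD_add_one_eq_counter,
    PySem.List.foldl_append_if (fun kv : Char × Int => kv.2 == (1 : Int)) Prod.fst,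
    PySem.Dict.items_counter, List.filter_map, List.map_map]
  simp only [List.nil_append, Function.comp_def]
  simp only [List.map_id_fun']
  apply List.filter_congr
  intro c _
  simp

lemma runMore_eq_length_takeWhile (c : Char) (l : List Char) :
    runMore c l = (l.takeWhile (· == c)).length := by
  induction l with
  | nil => simp [runMore]
  | cons x xs ih =>
      simp only [runMore, List.takeWhile_cons]
      by_cases h : x == c
      · simp [h, ih]
      · simp [h]

-- on a ≤-sorted list, the head is not in the dropWhile-(== head) remainder
lemma head_not_mem_drop (c : Char) (r : List Char)
    (hs : (c :: r).Pairwise (· ≤ ·)) : c ∉ r.dropWhile (· == c) := by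
  intro hmem
  cases hd : r.dropWhile (· == c) with
  | nil => simp [hd] at hmem
  | cons e d' =>
      have hec : ¬ (e == c) = true := by
        have := List.head_dropWhile_not (p := (· == c)) (l := r) (by simp [hd])
        simpa [hd] using this
      have her : e ∈ r := by
        have h1 : e ∈ r.dropWhile (· == c) := by simp [hd]
        exact (List.dropWhile_sublist _).subset h1
      have hce : c ≤ e := (List.pairwise_cons.mp hs).1 e her
      have hde : (r.dropWhile (· == c)).Pairwise (· ≤ ·) :=
        List.Pairwise.sublist (List.dropWhile_sublist _) (List.pairwise_cons.mp hs).2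
      rw [hd] at hmem hde
      rcases List.mem_cons.mp hmem with h | h
      · exact hec (by simp [h])
      · have hec' : e ≤ c := (List.pairwise_cons.mp hde).1 c h
        exact hec (by simp [le_antisymm hec' hce])

-- scanRuns on a ≤-sorted list keeps exactly the characters occurring once in it
lemma scanRuns_eq_filter_aux : ∀ (n : Nat) (t : List Char), t.length ≤ n →
    t.Pairwise (· ≤ ·) → scanRuns t = t.filter (fun c => t.count c == 1) := by
  intro n
  induction n with
  | zero =>
      intro t ht _
      have : t = [] := by cases t <;> simp_all
      simp [this, scanRuns]
  | succ n ihn =>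
      intro t ht hs
      cases t with
      | nil => simp [scanRuns]
      | cons c r =>
        obtain ⟨w, d, hrwd, hwc, hcd, hm, hds⟩ :
            ∃ w d, r = w ++ d ∧ (∀ x ∈ w, x = c) ∧ c ∉ d ∧
              runMore c r = w.length ∧ d.Pairwise (· ≤ ·) := by
          refine ⟨r.takeWhile (· == c), r.dropWhile (· == c),
            (List.takeWhile_append_dropWhile).symm,
            (fun x hx => by simpa using List.mem_takeWhile_imp hx),
            head_not_mem_drop c r hs,
            runMore_eq_length_takeWhile c r,
            List.Pairwise.sublist (List.dropWhile_sublist _) (List.pairwise_cons.mp hs).2⟩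
        subst hrwd
        have ih := ihn d (by simp at ht ⊢; omega) hds
        have hwcount : w.count c = w.length := by
          rw [List.count_eq_length]
          intro x hx; simp [hwc x hx]
        have hdcount : d.count c = 0 := List.count_eq_zero_of_not_mem hcd
        have hcount_c : (c :: (w ++ d)).count c = 1 + w.length := by
          simp [List.count_append, hwcount, hdcount]
          omega
        have hcount_d : ∀ x ∈ d, (c :: (w ++ d)).count x = d.count x := by
          intro x hx
          have hxc : x ≠ c := fun h => hcd (h ▸ hx)
          have hxw : x ∉ w := fun h => hxc (hwc x h)
          simp [List.count_append, Ne.symm hxc,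
            List.count_eq_zero_of_not_mem hxw]
        -- the filter side
        have hfilter : (c :: (w ++ d)).filter (fun x => (c :: (w ++ d)).count x == 1)
            = (if w.length = 0 then [c] else []) ++ d.filter (fun x => d.count x == 1) := by
          rw [List.filter_cons, List.filter_append]
          have hwf : w.filter (fun x => (c :: (w ++ d)).count x == 1) = [] := by
            rw [List.filter_eq_nil_iff]
            intro x hx
            have hx1 : (0 : Nat) < w.length := List.length_pos_of_mem hx
            rw [hwc x hx]
            simp only [hcount_c, beq_iff_eq]
            omega
          have hdf : d.filter (fun x => (c :: (w ++ d)).count x == 1)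
              = d.filter (fun x => d.count x == 1) :=
            List.filter_congr (fun x hx => by rw [hcount_d x hx])
          rw [hwf, hdf]
          simp only [hcount_c]
          cases w with
          | nil => simp
          | cons y ys => simp
        -- the scan side
        have hdrop : (c :: (w ++ d)).drop (1 + runMore c (w ++ d)) = d := by
          rw [hm, Nat.add_comm, List.drop_succ_cons, List.drop_append_of_le_length le_rfl]
          simp
        rw [hm] at hdrop
        rw [scanRuns]
        simp only [hm, hdrop, ih, hfilter]
        cases w with
        | nil => simp
        | cons y ys => simp

lemma scanRuns_eq_filter (t : List Char) (hs : t.Pairwise (· ≤ ·)) :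
    scanRuns t = t.filter (fun c => t.count c == 1) :=
  scanRuns_eq_filter_aux t.length t le_rfl hs

-- ''.join of singleton strings is ofList
lemma join_singletons (xs : List Char) :
    PySem.Str.join "" (xs.map (fun c => String.ofList [c])) = String.ofList xs := by
  have h2 : (PySem.Str.join "" (xs.map (fun c => String.ofList [c]))).toList = xs := by
    rw [PySem.Str.toList_join]
    simpa [List.map_map, Function.comp_def] using PySem.Chars.join_nil_singletons (cs := xs)
  rw [← String.ofList_toList (s := PySem.Str.join "" (xs.map (fun c => String.ofList [c]))), h2]

-- B's scan of the sorted characters equals A's sorted filtered dedup list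
lemma scan_sorted_eq (l : List Char) :
    scanRuns (PySem.List.sorted l (fun x => x) false)
      = PySem.List.sorted ((PySem.Set.ofList l).filter (fun c => l.count c == 1))
          (fun x => x) false := by
  have hp : (PySem.List.sorted l (fun x => x) false).Pairwise (· ≤ ·) := by
    simpa using PySem.List.sorted_pairwise (xs := l) (key := fun x => x)
  rw [scanRuns_eq_filter _ hp]
  have hcnt : ∀ c : Char, (PySem.List.sorted l (fun x => x) false).count c = l.count c :=
    fun c => (PySem.List.sorted_perm (xs := l) (key := fun x => x) (rev := false)).count_eq c
  have hfc : (PySem.List.sorted l (fun x => x) false).filter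
        (fun c => (PySem.List.sorted l (fun x => x) false).count c == 1)
      = (PySem.List.sorted l (fun x => x) false).filter (fun c => l.count c == 1) :=
    List.filter_congr (fun x _ => by rw [hcnt x])
  rw [hfc]
  -- the filtered sorted list is nodup (each kept char has count 1) …
  have hnd : ((PySem.List.sorted l (fun x => x) false).filter
      (fun c => l.count c == 1)).Nodup := by
    rw [List.nodup_iff_count_le_one]
    intro a
    by_cases h : l.count a = 1
    · rw [List.count_filter (by simp [h]), hcnt a, h]
    · have hnm : a ∉ (PySem.List.sorted l (fun x => x) false).filter
          (fun c => l.count c == 1) := by simp [List.mem_filter, h]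
      simp [List.count_eq_zero_of_not_mem hnm]
  -- … hence strictly increasing …
  have hlt : ((PySem.List.sorted l (fun x => x) false).filter
      (fun c => l.count c == 1)).Pairwise (· < ·) := by
    have hle := hp.filter (fun c => l.count c == 1)
    exact (hle.and hnd).imp (fun h => lt_of_le_of_ne h.1 h.2)
  -- … and a permutation of the filtered dedup list (same members, both nodup)
  have hperm : ((PySem.List.sorted l (fun x => x) false).filter
        (fun c => l.count c == 1)).Perm
      ((PySem.Set.ofList l).filter (fun c => l.count c == 1)) := by
    rw [List.perm_ext_iff_of_nodup hnd (List.Nodup.filter _ (PySem.Set.nodup_ofList l))]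
    intro a
    simp [List.mem_filter, PySem.List.mem_sorted, PySem.Set.mem_ofList]
  exact (PySem.List.sorted_eq_of_perm_of_pairwise_lt _ _ (fun x => x) hperm (by simpa using hlt)).symm

-- ===== VERDICT (by name: the statement is the Claim_ definition above) =====
theorem solution_spec : Claim_equal_solution := by
  intro s _
  unfold Spec_solution solution solution_alt
  simp only [listA_eq, scan_sorted_eq, join_singletons]
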